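-- pv_equiv track=rewrite | github.com/Shouvik103/NLP_Project | modules/graph_based.py | _dedupe_and_prune
-- ===== SOURCE A (Python) =====
-- from typing import Dict, Iterable, List, Sequence, Set, Tuple, Union
--
-- def _dedupe_and_prune(sentences: Sequence[str]) -> List[str]:
--   """Remove duplicates and obvious redundant overlaps."""
--   unique: List[str] = []
--   seen: Set[str] = set()
--
--   for s in sentences:
--     key = " ".join(s.lower().split())
--     if not key or key in seen:
--       continue
--     seen.add(key)
--     unique.append(s)
--
--   # Remove very short sentences that are strict substrings of longer ones.
--   keep = [True] * len(unique)
--   for i, a in enumerate(unique):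
--     a_norm = " ".join(a.lower().split())
--     a_len = len(a_norm.split())
--     for j, b in enumerate(unique):
--       if i == j:
--         continue
--       b_norm = " ".join(b.lower().split())
--       b_len = len(b_norm.split())
--       if a_norm in b_norm and a_len < b_len * 0.7:
--         keep[i] = False
--         break
--
--   return [s for s, k in zip(unique, keep) if k]
-- ===== SOURCE B (Python) =====
-- from typing import List, Sequence
--
--
-- def _dedupe_and_prune(sentences: Sequence[str]) -> List[str]:
--     """Remove duplicates and obvious redundant overlaps."""
--     # One pass: keep each distinct normalization once, with its word count.
--     uniq = []  # (original sentence, normalized form, word count)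
--     seen = set()
--     for s in sentences:
--         norm = " ".join(s.lower().split())
--         if norm and norm not in seen:
--             seen.add(norm)
--             uniq.append((s, norm, len(norm.split())))
--
--     # Candidates sorted by word count, longest first.  The length gate
--     # wc < b_len * 0.7 is monotone in b_len, so the scan for a pruning
--     # candidate stops at the first one failing the gate; no i == j guard
--     # is needed because a sentence never passes the gate against itself.
--     by_len = sorted(uniq, key=lambda t: t[2], reverse=True)
--
--     result = []
--     for s, norm, wc in uniq:
--         pruned = False
--         for _, b_norm, b_len in by_len:
--             if not (wc < b_len * 0.7):
--                 break
--             if norm in b_norm: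
--                 pruned = True
--                 break
--         if not pruned:
--             result.append(s)
--     return result
-- ===== Notes on version B (the rewrite author's own statement) =====
-- stated objective: faster
-- what changed: B normalizes every sentence once into (sentence, norm, word_count) triples, then sorts the candidates by word count descending so the prune scan for each sentence stops at the first candidate failing the monotone length gate, instead of A's all-pairs scan that re-normalizes both sentences in every inner iteration.
import Mathlib
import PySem

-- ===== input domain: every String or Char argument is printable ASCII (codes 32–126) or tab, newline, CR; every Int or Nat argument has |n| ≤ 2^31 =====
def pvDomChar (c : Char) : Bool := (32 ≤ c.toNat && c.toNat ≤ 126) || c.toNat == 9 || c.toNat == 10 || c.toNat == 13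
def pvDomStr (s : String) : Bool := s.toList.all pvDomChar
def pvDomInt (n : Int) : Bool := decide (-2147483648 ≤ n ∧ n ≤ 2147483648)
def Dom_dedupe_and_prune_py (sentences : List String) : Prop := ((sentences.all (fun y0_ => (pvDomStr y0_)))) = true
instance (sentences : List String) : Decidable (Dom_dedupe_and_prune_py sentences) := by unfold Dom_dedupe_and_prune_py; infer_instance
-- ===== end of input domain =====

-- B normalizes every sentence once into (sentence, norm, word_count) triples and sorts the
-- prune candidates by word count descending, so each scan stops at the first candidate
-- failing the monotone length gate, instead of A's all-pairs scan that re-normalizes both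
-- sentences in every inner iteration.

-- ===== PORT A =====
-- " ".join(s.lower().split())
def pvNorm (s : String) : String := PySem.Str.join " " (PySem.Str.split₀ (PySem.Str.lower s))
-- len(t.split())
def pvWC (t : String) : Nat := (PySem.Str.split₀ t).length
-- the length gate `a_len < b_len * 0.7`: on word counts below 10^12 the double
-- computation `a_len < b_len * 0.7` is exactly the rational comparison 10*a_len < 7*b_len
def pvGate (a_len b_len : Nat) : Bool := decide (10 * a_len < 7 * b_len)

-- A's dedup loop: for s in sentences: key = norm(s); if not key or key in seen: continue; …
def pvDedupLoopA : List String → PySem.Set String → List String → List String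
  | [], _, unique => unique
  | s :: rest, seen, unique =>
    let key := pvNorm s
    if key == "" || PySem.Set.contains seen key then pvDedupLoopA rest seen unique
    else pvDedupLoopA rest (PySem.Set.add seen key) (unique ++ [s])

-- A's inner `for j, b in enumerate(unique)` loop (break ⇒ keep[i] = False)
def pvInnerA (i : Int) (a_norm : String) (a_len : Nat) : List (Int × String) → Bool
  | [] => true
  | (j, b) :: rest =>
    if i = j then pvInnerA i a_norm a_len rest
    else
      let b_norm := pvNorm b
      let b_len := pvWC b_norm
      if PySem.Str.isIn a_norm b_norm && pvGate a_len b_len then false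
      else pvInnerA i a_norm a_len rest

def dedupe_and_prune_py (sentences : List String) : List String :=
  let unique := pvDedupLoopA sentences PySem.Set.empty []
  let keep := (PySem.List.enumerate unique 0).map (fun p =>
    let a_norm := pvNorm p.2
    let a_len := pvWC a_norm
    pvInnerA p.1 a_norm a_len (PySem.List.enumerate unique 0))
  ((unique.zip keep).filter (fun q => q.2)).map (fun q => q.1)

-- ===== PORT B =====
-- B's single normalization pass building (sentence, norm, word_count) triples
def pvUniqLoopB : List String → PySem.Set String → List (String × String × Nat) → List (String × String × Nat)
  | [], _, uniq => uniq
  | s :: rest, seen, uniq =>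
    let norm := pvNorm s
    if norm != "" && !(PySem.Set.contains seen norm) then
      pvUniqLoopB rest (PySem.Set.add seen norm) (uniq ++ [(s, norm, pvWC norm)])
    else pvUniqLoopB rest seen uniq

-- B's candidate scan over the length-sorted list with its two breaks
def pvScanB (norm : String) (wc : Nat) : List (String × String × Nat) → Bool
  | [] => false
  | t :: rest =>
    if pvGate wc t.2.2 then
      if PySem.Str.isIn norm t.2.1 then true
      else pvScanB norm wc rest
    else false

def dedupe_and_prune_py_alt (sentences : List String) : List String :=
  let uniq := pvUniqLoopB sentences PySem.Set.empty []
  let by_len := PySem.List.sorted uniq (fun t => t.2.2) true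
  uniq.foldl (fun result t =>
    if pvScanB t.2.1 t.2.2 by_len then result else result ++ [t.1]) []

-- ===== PRECONDITION & SPEC =====
def Spec_dedupe_and_prune_py (sentences : List String) (out : List String) : Prop := out = dedupe_and_prune_py_alt sentences
instance (sentences : List String) (out : List String) : Decidable (Spec_dedupe_and_prune_py sentences out) := by unfold Spec_dedupe_and_prune_py; infer_instance

-- ===== CLAIM (what is proved, stated in full; the proofs are below) =====
def Claim_equal_dedupe_and_prune_py : Prop := ∀ (sentences : List String), Dom_dedupe_and_prune_py sentences → Spec_dedupe_and_prune_py sentences (dedupe_and_prune_py sentences)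

-- ===== LEMMAS AND PROOFS =====

-- the triple B stores for a kept sentence
def pvF (s : String) : String × String × Nat := (s, pvNorm s, pvWC (pvNorm s))

-- "b prunes a": a's norm occurs in b's norm and a is much shorter
def pvP (a b : String) : Bool :=
  PySem.Str.isIn (pvNorm a) (pvNorm b) && pvGate (pvWC (pvNorm a)) (pvWC (pvNorm b))

theorem pvGate_lt (al bl : Nat) : pvGate al bl = true ↔ 10 * al < 7 * bl := by
  simp [pvGate]

theorem pvGate_self (w : Nat) : pvGate w w = false := by
  simp only [pvGate, decide_eq_false_iff_not]
  omega

theorem pvUniq_eq_map (sents : List String) :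
    ∀ (seen : PySem.Set String) (acc : List String),
      pvUniqLoopB sents seen (acc.map pvF) = (pvDedupLoopA sents seen acc).map pvF := by
  induction sents with
  | nil => intro seen acc; simp [pvUniqLoopB, pvDedupLoopA]
  | cons s rest ih =>
    intro seen acc
    have hBA : (pvNorm s != "" && !PySem.Set.contains seen (pvNorm s))
        = !(pvNorm s == "" || PySem.Set.contains seen (pvNorm s)) := by
      simp [bne, Bool.not_or]
    simp only [pvUniqLoopB, pvDedupLoopA, hBA]
    cases hA2 : (pvNorm s == "" || PySem.Set.contains seen (pvNorm s)) with
    | true =>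
      simp only [Bool.not_true]
      rw [if_pos trivial]
      exact ih seen acc
    | false =>
      simp only [Bool.not_false]
      rw [if_pos trivial, if_neg Bool.false_ne_true]
      have hmap : acc.map pvF ++ [(s, pvNorm s, pvWC (pvNorm s))] = (acc ++ [s]).map pvF := by
        simp [pvF]
      rw [hmap]
      exact ih _ (acc ++ [s])

theorem pvInnerA_eq_not_any (i : Int) (an : String) (al : Nat) :
    ∀ (l : List (Int × String)),
      pvInnerA i an al l
        = !(l.any (fun q => !(q.1 == i)
            && (PySem.Str.isIn an (pvNorm q.2) && pvGate al (pvWC (pvNorm q.2))))) := by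
  intro l
  induction l with
  | nil => simp [pvInnerA]
  | cons q rest ih =>
    obtain ⟨j, b⟩ := q
    rw [List.any_cons]
    simp only [pvInnerA]
    by_cases hij : i = j
    · rw [if_pos hij, ih]
      subst hij
      simp only [beq_self_eq_true, Bool.not_true, Bool.false_and, Bool.false_or]
    · have hji : (j == i) = false := beq_eq_false_iff_ne.mpr (fun h => hij h.symm)
      rw [if_neg hij]
      cases hg : (PySem.Str.isIn an (pvNorm b) && pvGate al (pvWC (pvNorm b))) with
      | true =>
        rw [if_pos (rfl : true = true)]
        simp only [hji, Bool.not_false, Bool.and_true, Bool.true_or, Bool.not_true]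
      | false =>
        rw [if_neg Bool.false_ne_true, ih]
        simp only [Bool.and_false, Bool.false_or]

theorem pvScanB_eq_any (n : String) (w : Nat) :
    ∀ (l : List (String × String × Nat)),
      l.Pairwise (fun x y => y.2.2 ≤ x.2.2) →
      pvScanB n w l
        = l.any (fun t => PySem.Str.isIn n t.2.1 && pvGate w t.2.2) := by
  intro l
  induction l with
  | nil => intro _; simp [pvScanB]
  | cons t rest ih =>
    intro hp
    rw [List.pairwise_cons] at hp
    obtain ⟨hle, htail⟩ := hp
    rw [List.any_cons]
    simp only [pvScanB]
    cases hg : pvGate w t.2.2 with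
    | true =>
      rw [if_pos (rfl : true = true)]
      cases hin : PySem.Str.isIn n t.2.1 with
      | true =>
        rw [if_pos (rfl : true = true)]
        simp only [Bool.true_and, Bool.true_or]
      | false =>
        rw [if_neg Bool.false_ne_true, ih htail]
        simp only [Bool.false_and, Bool.false_or]
    | false =>
      rw [if_neg Bool.false_ne_true]
      have hall : rest.any (fun x => PySem.Str.isIn n x.2.1 && pvGate w x.2.2) = false := by
        rw [List.any_eq_false]
        intro x hx
        have hxle := hle x hx
        intro hcontra
        rw [Bool.and_eq_true, pvGate_lt] at hcontra
        have hng : ¬ (10 * w < 7 * t.2.2) := by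
          intro hlt
          rw [← pvGate_lt] at hlt
          rw [hg] at hlt
          exact Bool.false_ne_true hlt
        omega
      rw [hall]
      simp only [Bool.and_false, Bool.or_false]

theorem pvAny_sorted_rev (l : List (String × String × Nat)) (f : String × String × Nat → Bool) :
    (PySem.List.sorted l (fun t => t.2.2) true).any f = l.any f := by
  cases h : l.any f
  · rw [List.any_eq_false] at h ⊢
    intro x hx
    exact h x ((PySem.List.mem_sorted _ _ _ _).mp hx)
  · rw [List.any_eq_true] at h ⊢
    obtain ⟨x, hx, hfx⟩ := h
    exact ⟨x, (PySem.List.mem_sorted _ _ _ _).mpr hx, hfx⟩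

-- A's zip-with-keep phrased as a filter of the enumeration
theorem pvZip_enum_filter {α : Type} (h : Int × α → Bool) :
    ∀ (xs : List α) (s : Int),
      ((xs.zip ((PySem.List.enumerate xs s).map h)).filter (fun q => q.2)).map (fun q => q.1)
        = ((PySem.List.enumerate xs s).filter h).map (fun q => q.2) := by
  intro xs
  induction xs with
  | nil => intro s; simp [PySem.List.enumerate_nil]
  | cons x rest ih =>
    intro s
    rw [PySem.List.enumerate_cons]
    simp only [List.map_cons, List.zip_cons_cons, List.filter_cons]
    by_cases hh : h (s, x) = true
    · simp only [hh]
      simp [ih (s + 1)]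
    · simp only [Bool.not_eq_true] at hh
      simp [hh, ih (s + 1)]

theorem pvEnum_filter_snd {α : Type} (g : α → Bool) :
    ∀ (xs : List α) (s : Int),
      ((PySem.List.enumerate xs s).filter (fun q => g q.2)).map (fun q => q.2) = xs.filter g := by
  intro xs
  induction xs with
  | nil => intro s; simp [PySem.List.enumerate_nil]
  | cons x rest ih =>
    intro s
    rw [PySem.List.enumerate_cons]
    simp only [List.filter_cons]
    by_cases hh : g x = true
    · simp [hh, ih (s + 1)]
    · simp only [Bool.not_eq_true] at hh
      simp [hh, ih (s + 1)]

-- a sentence never prunes itself: the gate fails on equal word counts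
theorem pvP_self (a : String) : pvP a a = false := by
  simp only [pvP, pvGate_self, Bool.and_false]

-- A's result as a plain filter of `unique`
theorem pvA_result (unique : List String) :
    (((unique.zip ((PySem.List.enumerate unique 0).map (fun p =>
        pvInnerA p.1 (pvNorm p.2) (pvWC (pvNorm p.2)) (PySem.List.enumerate unique 0)))).filter
          (fun q => q.2)).map (fun q => q.1))
      = unique.filter (fun a => !(unique.any (fun b => pvP a b))) := by
  rw [pvZip_enum_filter]
  have hcong : ∀ p ∈ PySem.List.enumerate unique 0,
      pvInnerA p.1 (pvNorm p.2) (pvWC (pvNorm p.2)) (PySem.List.enumerate unique 0)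
        = !(unique.any (fun b => pvP p.2 b)) := by
    intro p hp
    rw [pvInnerA_eq_not_any]
    congr 1
    rw [PySem.List.mem_enumerate_iff] at hp
    obtain ⟨k, hk, rfl⟩ := hp
    cases hany : (unique.any (fun b => pvP (0 + (k : Int), unique[k]).2 b))
    · rw [List.any_eq_false] at hany ⊢
      intro q hq
      rw [PySem.List.mem_enumerate_iff] at hq
      obtain ⟨k', hk', rfl⟩ := hq
      have hthis := hany unique[k'] (by simp)
      intro hx
      rw [Bool.and_eq_true] at hx
      exact hthis hx.2
    · rw [List.any_eq_true] at hany ⊢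
      obtain ⟨b, hb, hpb⟩ := hany
      obtain ⟨k', hk', rfl⟩ := List.getElem_of_mem hb
      refine ⟨(0 + (k' : Int), unique[k']), ?_, ?_⟩
      · rw [PySem.List.mem_enumerate_iff]; exact ⟨k', hk', rfl⟩
      · have hne : ¬ ((0 + (k' : Int) == 0 + (k : Int)) = true) := by
          simp only [beq_iff_eq]
          intro hkk
          have hkk' : k' = k := by omega
          subst hkk'
          rw [pvP_self] at hpb
          exact Bool.false_ne_true hpb
        rw [Bool.and_eq_true]
        refine ⟨?_, hpb⟩
        cases hb2 : (0 + (k' : Int) == 0 + (k : Int)) with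
        | false => rfl
        | true => exact absurd hb2 hne
  have h2 := List.filter_congr (l := PySem.List.enumerate unique 0)
      (p := fun p => pvInnerA p.1 (pvNorm p.2) (pvWC (pvNorm p.2)) (PySem.List.enumerate unique 0))
      (q := fun p => !(unique.any (fun b => pvP p.2 b))) hcong
  rw [h2, pvEnum_filter_snd (fun a => !(unique.any (fun b => pvP a b))) unique 0]

-- B's fold as a filter
theorem pvB_fold (by_len : List (String × String × Nat)) :
    ∀ (l : List (String × String × Nat)) (acc : List String),
      l.foldl (fun result t =>
          if pvScanB t.2.1 t.2.2 by_len then result else result ++ [t.1]) acc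
        = acc ++ (l.filter (fun t => !(pvScanB t.2.1 t.2.2 by_len))).map (fun t => t.1) := by
  intro l
  induction l with
  | nil => intro acc; simp
  | cons t rest ih =>
    intro acc
    simp only [List.foldl_cons, List.filter_cons]
    cases hs : pvScanB t.2.1 t.2.2 by_len with
    | true =>
      rw [if_pos (rfl : true = true)]
      simp only [Bool.not_true, Bool.false_eq_true, if_false, ih]
    | false =>
      rw [if_neg Bool.false_ne_true]
      simp only [Bool.not_false, if_true, ih]
      simp

-- a filter of a mapped list, pulled back through the map
theorem pvGenMapFilter {α β : Type} (f : α → β) (p : β → Bool) (g : β → α)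
    (hg : ∀ a, g (f a) = a) :
    ∀ l : List α, (((l.map f).filter p).map g) = l.filter (fun a => p (f a)) := by
  intro l
  induction l with
  | nil => rfl
  | cons a rest ih =>
    rw [List.map_cons, List.filter_cons, List.filter_cons]
    cases hb : p (f a) with
    | true => rw [if_pos rfl, if_pos rfl, List.map_cons, ih, hg]
    | false => rw [if_neg Bool.false_ne_true, if_neg Bool.false_ne_true, ih]

theorem pvB_result (unique : List String) :
    ((unique.map pvF).foldl (fun result t =>
        if pvScanB t.2.1 t.2.2 (PySem.List.sorted (unique.map pvF) (fun t => t.2.2) true)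
        then result else result ++ [t.1]) [])
      = unique.filter (fun a => !(unique.any (fun b => pvP a b))) := by
  rw [pvB_fold, List.nil_append,
    pvGenMapFilter pvF
      (fun t => !(pvScanB t.2.1 t.2.2 (PySem.List.sorted (unique.map pvF) (fun t => t.2.2) true)))
      (fun t => t.1) (fun a => rfl) unique]
  have key : ∀ a : String,
      pvScanB (pvNorm a) (pvWC (pvNorm a)) (PySem.List.sorted (unique.map pvF) (fun t => t.2.2) true)
        = unique.any (fun b => pvP a b) := by
    intro a
    rw [pvScanB_eq_any _ _ _ (PySem.List.sorted_pairwise_rev _ _), pvAny_sorted_rev, List.any_map]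
    exact PySem.List.any_congr_mem (fun b _ => by
      dsimp only [Function.comp, pvF, pvP])
  exact List.filter_congr (fun a _ => by
    dsimp only [pvF]
    simp only [key a])

-- ===== VERDICT (by name: the statement is the Claim_ definition above) =====
theorem dedupe_and_prune_py_spec : Claim_equal_dedupe_and_prune_py := by
  intro sentences _
  unfold Spec_dedupe_and_prune_py dedupe_and_prune_py dedupe_and_prune_py_alt
  have huniq : pvUniqLoopB sentences PySem.Set.empty []
      = (pvDedupLoopA sentences PySem.Set.empty []).map pvF := by
    have h := pvUniq_eq_map sentences PySem.Set.empty []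
    simpa using h
  simp only [huniq]
  rw [pvA_result, pvB_result]
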